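/- GENERATED by tools/from_farm_form.py from prooffarm-gif/accepted/DGifSlurp.3/Proof.lean (a worked proof of the farm's unit `DGifSlurp.3`,
   accepted by the verdict) — do not edit. -/
import Gif.Spec.Units.DGifSlurp_3
import Gif.Spec.AllSegs
import Gif.Spec.Proved.DGifSlurp_3_Lemmas

/-!
  The unit `DGifSlurp.3`: segment 3 of `DGifSlurp` (dgif_lib.c:1203, 10A6F9H … 10A70BH | 10A8EDH): the call of DGifGetImageDesc
  (`seg3_call`, to its return address 10A701H), then `ebx = eax ; test ; je` (`seg3_tail`), chained by `ReachVia.trans`.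
-/

open X86 X86.User Asan ProgX.Base ProgX.Base.Spec Gif.Spec

namespace Gif.Spec.DGifSlurp_3

end Gif.Spec.DGifSlurp_3

/-- Segment 3 of `DGifSlurp` takes `Rec` at 10A6F9H to `IM` at 10A70BH (GIF_OK) or to the epilogue's `Exit` at 10A8EDH (GIF_ERROR). -/
theorem Gif.Spec.Proved.DGifSlurp_3_ok : Gif.Spec.DGifSlurp_3.Statement := by
  unfold Gif.Spec.DGifSlurp_3.Statement
  intro Lay hLay μ hμ u₀ hcode h_DGifGetImageDesc
  intro H rest frames F R Hc Fc m e ret v hat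
  -- 10A6F9H … 10A701H: the call, with the callee's contract for the present heap and forest and the own frame in front
  have hcallee := h_DGifGetImageDesc Hc rest (Gif.Spec.DGifSlurp.framesIn frames e) Fc R
  refine (Gif.Spec.DGifSlurp_3.seg3_call Lay hLay μ hμ u₀ hcode H rest frames F R Hc Fc m e ret hcallee v hat).trans ?_
  -- 10A701H … 10A70BH | 10A8EDH: the test of the result
  intro w hw
  obtain ⟨H', F', hret3⟩ := hw
  exact Gif.Spec.DGifSlurp_3.seg3_tail Lay hLay μ hμ u₀ hcode H rest frames F R H' F' m e ret w hret3
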